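-- pv_equiv track=rewrite | github.com/WoosungMichael/Algorithm | Programmers/Python/Level_2/pickingTangerine.py | solution
-- ===== SOURCE A (Python) =====
-- def solution(k, tangerine):
--     answer = 0
--     dic = {}
--     for i in tangerine:
--         if i in dic:
--             dic[i] += 1
--         else:
--             dic[i] = 1
--     dic = sorted(dic.items(), key=lambda x: -x[1])
--     for i in dic:
--         answer += 1
--         if k - i[1] <= 0:
--             break
--         else:
--             k -= i[1]
--     return answer
-- ===== SOURCE B (Python) =====
-- def solution(k, tangerine):
--     cnt = {}
--     for i in tangerine:
--         cnt[i] = cnt.get(i, 0) + 1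
--     n = len(tangerine)
--     bucket = [0] * (n + 1)
--     for f in cnt.values():
--         bucket[f] += 1
--     answer = 0
--     for f in range(n, 0, -1):
--         for _ in range(bucket[f]):
--             answer += 1
--             if k <= f:
--                 return answer
--             k -= f
--     return answer
-- ===== Notes on version B (the rewrite author's own statement) =====
-- stated objective: alternative
-- what changed: B replaces A's comparison sort of the frequency table (sorted by -count) with a bucket count indexed by frequency value (bounded by len(tangerine)), scanned from the highest frequency down with the same greedy early return.
import Mathlib
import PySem

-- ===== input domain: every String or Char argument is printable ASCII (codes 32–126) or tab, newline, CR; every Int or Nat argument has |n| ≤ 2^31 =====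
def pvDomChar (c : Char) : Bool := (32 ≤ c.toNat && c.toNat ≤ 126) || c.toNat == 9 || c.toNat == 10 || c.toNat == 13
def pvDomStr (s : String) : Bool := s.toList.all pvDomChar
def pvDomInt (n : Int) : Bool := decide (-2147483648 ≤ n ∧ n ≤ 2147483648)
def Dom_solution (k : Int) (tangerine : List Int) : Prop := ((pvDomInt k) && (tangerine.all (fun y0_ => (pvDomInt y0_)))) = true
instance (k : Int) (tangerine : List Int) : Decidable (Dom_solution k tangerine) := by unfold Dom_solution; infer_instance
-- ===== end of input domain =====

-- B replaces A's comparison sort of the frequency table by a bucket count over the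
-- frequency values (each between 1 and len(tangerine)), scanned from the highest frequency
-- down: a different algorithm of similar measured cost (alternative, not claimed faster).

-- ===== PORT A =====
-- A's second 'for' loop (with its break), over the sorted items
def solutionLoop : List (Int × Int) → Int → Int → Int
  | [], _, answer => answer
  | i :: rest, k, answer =>
    if k - i.2 ≤ 0 then answer + 1 else solutionLoop rest (k - i.2) (answer + 1)

def solution (k : Int) (tangerine : List Int) : Int :=
  let dic := tangerine.foldl (fun d i =>
    if d.contains i then d.insert i (d.getD i 0 + 1) else d.insert i 1) PySem.Dict.empty
  let dicS := PySem.List.sorted dic.items (fun x => -x.2)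
  solutionLoop dicS k 0

-- ===== PORT B =====
-- 'bucket[f] += 1'
def bump (b : List Int) (f : Int) : List Int := b.set f.toNat (b.getD f.toNat 0 + 1)

-- 'for _ in range(r):' body; Sum.inr = the early 'return answer', Sum.inl = fall through
def innerLoop : Nat → Int → Int → Int → (Int × Int) ⊕ Int
  | 0, _, k, answer => Sum.inl (k, answer)
  | r + 1, f, k, answer =>
    if k ≤ f then Sum.inr (answer + 1) else innerLoop r f (k - f) (answer + 1)

-- 'for f in range(n, 0, -1):'
def outerLoop (bucket : List Int) : List Int → Int → Int → Int
  | [], _, answer => answer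
  | f :: rest, k, answer =>
    match innerLoop (bucket.getD f.toNat 0).toNat f k answer with
    | Sum.inr a => a
    | Sum.inl (k', a') => outerLoop bucket rest k' a'

def solution_alt (k : Int) (tangerine : List Int) : Int :=
  let cnt := tangerine.foldl (fun d i => d.insert i (d.getD i 0 + 1)) PySem.Dict.empty
  let n := tangerine.length
  let bucket := cnt.values.foldl bump (List.replicate (n + 1) 0)
  outerLoop bucket (PySem.List.pyRange (n : Int) 0 (-1)) k 0

-- ===== PRECONDITION & SPEC =====
def Spec_solution (k : Int) (tangerine : List Int) (out : Int) : Prop := out = solution_alt k tangerine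
instance (k : Int) (tangerine : List Int) (out : Int) : Decidable (Spec_solution k tangerine out) := by unfold Spec_solution; infer_instance

-- ===== CLAIM (what is proved, stated in full; the proofs are below) =====
def Claim_equal_solution : Prop := ∀ (k : Int) (tangerine : List Int), Dom_solution k tangerine → Spec_solution k tangerine (solution k tangerine)

-- ===== LEMMAS AND PROOFS =====

-- the common greedy core: walk a list of frequencies; Sum.inr = early return
def G : List Int → Int → Int → (Int × Int) ⊕ Int
  | [], k, a => Sum.inl (k, a)
  | c :: cs, k, a => if k ≤ c then Sum.inr (a + 1) else G cs (k - c) (a + 1)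

def gOut : (Int × Int) ⊕ Int → Int
  | Sum.inl (_, a) => a
  | Sum.inr a => a

-- A's loop is the greedy core on the second components
theorem solutionLoop_eq_G (l : List (Int × Int)) (k a : Int) :
    solutionLoop l k a = gOut (G (l.map (·.2)) k a) := by
  induction l generalizing k a with
  | nil => rfl
  | cons p rest ih =>
      simp only [solutionLoop, List.map, G]
      by_cases h : k ≤ p.2
      · rw [if_pos (by omega : k - p.2 ≤ 0), if_pos h]
        rfl
      · rw [if_neg (by omega : ¬ k - p.2 ≤ 0), if_neg h, ih]

theorem G_append (xs ys : List Int) (k a : Int) :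
    G (xs ++ ys) k a =
      match G xs k a with
      | Sum.inl (k', a') => G ys k' a'
      | Sum.inr a' => Sum.inr a' := by
  induction xs generalizing k a with
  | nil => rfl
  | cons c cs ih =>
      simp only [List.cons_append, G]
      by_cases h : k ≤ c <;> simp [h, ih]

theorem innerLoop_eq_G (r : Nat) (f k a : Int) :
    innerLoop r f k a = G (List.replicate r f) k a := by
  induction r generalizing k a with
  | zero => rfl
  | succ r ih =>
      simp only [innerLoop, List.replicate, G]
      by_cases h : k ≤ f <;> simp [h, ih]

-- B's outer loop is the greedy core on the flattened buckets
theorem outerLoop_eq_G (bucket : List Int) (fs : List Int) (k a : Int) :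
    outerLoop bucket fs k a =
      gOut (G (fs.flatMap (fun f => List.replicate (bucket.getD f.toNat 0).toNat f)) k a) := by
  induction fs generalizing k a with
  | nil => rfl
  | cons f rest ih =>
      simp only [outerLoop, List.flatMap_cons, G_append, innerLoop_eq_G]
      cases h : G (List.replicate (bucket.getD f.toNat 0).toNat f) k a with
      | inl p => cases p; simp [ih]
      | inr a' => simp [gOut]

-- [n, n-1, …, 1]
def descFs : Nat → List Int
  | 0 => []
  | n + 1 => ((n + 1 : Nat) : Int) :: descFs n

theorem map_range_desc (n : Nat) :
    (List.range n).map (fun k : Nat => (n : Int) - (k : Int)) = descFs n := by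
  induction n with
  | zero => rfl
  | succ m ih =>
      rw [List.range_succ_eq_map, descFs, ← ih, List.map_cons, List.map_map]
      refine congrArg₂ _ (by push_cast; ring) ?_
      apply List.map_congr_left
      intro j hj
      simp only [Function.comp]
      push_cast; ring

theorem pyRange_desc (n : Nat) : PySem.List.pyRange (n : Int) 0 (-1) = descFs n := by
  cases n with
  | zero => rfl
  | succ m =>
      rw [← map_range_desc]
      simp only [PySem.List.pyRange]
      norm_num
      intro a _
      ring

-- bucket lookup = count of f among the values, as long as every value indexes inside
theorem bucket_getD (vals : List Int) (b : List Int)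
    (hv : ∀ v ∈ vals, 0 ≤ v ∧ v.toNat < b.length) (f : Nat) (hf : f < b.length) :
    (vals.foldl bump b).getD f 0 = b.getD f 0 + (vals.count (f : Int) : Int) := by
  induction vals generalizing b with
  | nil => simp
  | cons v vs ih =>
      have hv0 := hv v (by simp)
      have hlen : (bump b v).length = b.length := by simp [bump]
      rw [List.foldl_cons, ih (bump b v) (fun w hw => by rw [hlen]; exact hv w (by simp [hw])) (hlen ▸ hf)]
      rw [List.count_cons]
      by_cases he : v = (f : Int)
      · have ht : v.toNat = f := by omega
        have hb : (bump b v).getD f 0 = b.getD f 0 + 1 := by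
          rw [bump, ht, List.getD_eq_getElem?_getD, List.getElem?_set_self (by omega),
            List.getD_eq_getElem?_getD]
          rfl
        rw [hb, he]
        simp only [beq_self_eq_true, if_true]
        push_cast
        ring
      · have hne : v.toNat ≠ f := by omega
        have hb : (bump b v).getD f 0 = b.getD f 0 := by
          rw [bump, List.getD_eq_getElem?_getD, List.getElem?_set_ne hne, List.getD_eq_getElem?_getD]
        rw [hb]
        simp only [beq_iff_eq, if_neg he]
        omega

-- the flattened bucket scan, abstractly: for each f from n down to 1, (count f vals) copies of f
def descRep (vals : List Int) : Nat → List Int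
  | 0 => []
  | n + 1 => List.replicate (vals.count ((n + 1 : Nat) : Int)) ((n + 1 : Nat) : Int) ++ descRep vals n

theorem flatMap_descFs (c : Int → Nat) (vals : List Int) (n : Nat)
    (h : ∀ j : Nat, 1 ≤ j → j ≤ n → c ((j : Nat) : Int) = vals.count ((j : Nat) : Int)) :
    (descFs n).flatMap (fun f => List.replicate (c f) f) = descRep vals n := by
  induction n with
  | zero => rfl
  | succ m ih =>
      simp only [descFs, descRep, List.flatMap_cons]
      rw [h (m + 1) (by omega) (by omega), ih (fun j a b => h j a (by omega))]

theorem descRep_count_congr (vals vals' : List Int) (n : Nat)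
    (h : ∀ f : Nat, 1 ≤ f → f ≤ n → vals.count (f : Int) = vals'.count (f : Int)) :
    descRep vals n = descRep vals' n := by
  induction n with
  | zero => rfl
  | succ m ih =>
      simp only [descRep]
      rw [h (m + 1) (by omega) (by omega), ih (fun f h1 h2 => h f h1 (by omega))]

theorem descRep_perm (vals : List Int) (n : Nat)
    (hv : ∀ v ∈ vals, 1 ≤ v ∧ v ≤ (n : Int)) : (descRep vals n).Perm vals := by
  induction n generalizing vals with
  | zero =>
      have hnil : vals = [] := by
        cases vals with
        | nil => rfl
        | cons x xs =>
            exfalso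
            have := hv x (by simp)
            omega
      simp [hnil, descRep]
  | succ m ih =>
      simp only [descRep]
      have hfilter : vals.filter (fun v => v == ((m + 1 : Nat) : Int))
          = List.replicate (vals.count ((m + 1 : Nat) : Int)) ((m + 1 : Nat) : Int) := by
        simpa using List.filter_eq (l := vals) ((m + 1 : Nat) : Int)
      have hcnt : ∀ f : Nat, 1 ≤ f → f ≤ m → vals.count ((f : Nat) : Int)
          = (vals.filter (fun v => !(v == ((m + 1 : Nat) : Int)))).count ((f : Nat) : Int) := by
        intro f h1 h2
        have hne : ((f : Nat) : Int) ≠ ((m + 1 : Nat) : Int) := by push_cast; omega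
        rw [List.count_filter (by simp; push_cast at hne ⊢; omega)]
      have hrest : (descRep vals m).Perm (vals.filter (fun v => !(v == ((m + 1 : Nat) : Int)))) := by
        rw [descRep_count_congr vals (vals.filter (fun v => !(v == ((m + 1 : Nat) : Int)))) m hcnt]
        apply ih
        intro v hvmem
        have hm := List.mem_of_mem_filter hvmem
        have h1 := hv v hm
        have hne : ¬(v = ((m + 1 : Nat) : Int)) := by
          have := List.of_mem_filter hvmem
          simpa using this
        push_cast at h1 hne ⊢
        omega
      have hperm : (List.replicate (vals.count ((m + 1 : Nat) : Int)) ((m + 1 : Nat) : Int) ++ descRep vals m).Perm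
          (vals.filter (fun v => v == ((m + 1 : Nat) : Int)) ++ vals.filter (fun v => !(v == ((m + 1 : Nat) : Int)))) := by
        rw [hfilter]
        exact List.Perm.append (List.Perm.refl _) hrest
      exact hperm.trans (List.filter_append_perm _ vals)

theorem descRep_le (vals : List Int) (n : Nat) :
    ∀ v ∈ descRep vals n, 1 ≤ v ∧ v ≤ (n : Int) := by
  induction n with
  | zero => simp [descRep]
  | succ m ih =>
      intro v hv
      simp only [descRep, List.mem_append] at hv
      rcases hv with h | h
      · have := List.eq_of_mem_replicate h
        subst this
        constructor
        · omega
        · simp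
      · have h2 := ih v h
        push_cast at h2 ⊢
        omega

theorem descRep_pairwise (vals : List Int) (n : Nat) :
    (descRep vals n).Pairwise (fun a b => b ≤ a) := by
  induction n with
  | zero => simp [descRep]
  | succ m ih =>
      simp only [descRep]
      apply List.pairwise_append.mpr
      refine ⟨List.pairwise_replicate.mpr (by simp), ih, ?_⟩
      intro a ha b hb
      have ha' := List.eq_of_mem_replicate ha
      have hb' := (descRep_le vals m b hb).2
      subst ha'
      push_cast at hb' ⊢
      omega

-- A's counting loop (with its membership branch) is the plain Counter loop
theorem countFun_eq :
    (fun (d : PySem.Dict Int Int) i =>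
        if d.contains i then d.insert i (d.getD i 0 + 1) else d.insert i 1)
      = fun (d : PySem.Dict Int Int) i => d.insert i (d.getD i 0 + 1) := by
  funext d i
  by_cases h : d.contains i = true
  · simp [h]
  · have h' : d.contains i = false := by simpa using h
    rw [if_neg (by simp [h']), PySem.Dict.getD_of_not_contains d 0 h']
    norm_num

-- ===== VERDICT (by name: the statement is the Claim_ definition above) =====
theorem solution_spec : Claim_equal_solution := by
  intro k t _
  unfold Spec_solution
  set vals : List Int := (PySem.Dict.counter t).values with hvals
  set n : Nat := t.length with hn
  -- bounds on the counter values
  have hbound : ∀ v ∈ vals, 1 ≤ v ∧ v ≤ (n : Int) := by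
    intro v hv
    rw [hvals] at hv
    simp only [PySem.Dict.values, PySem.Dict.items_counter, List.map_map] at hv
    obtain ⟨s, hs, rfl⟩ := List.mem_map.mp hv
    have hsm : s ∈ t := (PySem.Set.mem_ofList t s).mp hs
    have h1 : 0 < t.count s := List.count_pos_iff.mpr hsm
    have h2 : t.count s ≤ t.length := List.count_le_length
    simp only [Function.comp]
    omega
  -- A's side: the greedy core on the sorted frequency list
  have hA : solution k t
      = gOut (G ((PySem.List.sorted (PySem.Dict.counter t).items (fun x => -x.2)).map (·.2)) k 0) := by
    have hstep : solution k t
        = solutionLoop (PySem.List.sorted (PySem.Dict.counter t).items (fun x => -x.2)) k 0 := by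
      simp only [solution, countFun_eq, PySem.Dict.foldl_insert_getD_add_one_eq_counter]
    rw [hstep, solutionLoop_eq_G]
  -- B's side: the greedy core on the bucket scan
  set bucket : List Int := vals.foldl bump (List.replicate (n + 1) 0) with hbucketdef
  have hbucket : ∀ f : Nat, f < n + 1 → bucket.getD f 0 = (vals.count (f : Int) : Int) := by
    intro f hf
    rw [hbucketdef, bucket_getD vals (List.replicate (n + 1) 0)
      (fun v hv => ⟨by have := hbound v hv; omega, by have := hbound v hv; simp; omega⟩)
      f (by simp; omega)]
    simp
  have hL : (descFs n).flatMap (fun f => List.replicate (bucket.getD f.toNat 0).toNat f)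
      = descRep vals n := by
    apply flatMap_descFs
    intro j h1 h2
    have : ((j : Nat) : Int).toNat = j := by omega
    rw [this, hbucket j (by omega)]
    simp
  have hB : solution_alt k t = gOut (G (descRep vals n) k 0) := by
    have hstep : solution_alt k t
        = outerLoop ((PySem.Dict.counter t).values.foldl bump (List.replicate (t.length + 1) 0))
            (PySem.List.pyRange (t.length : Int) 0 (-1)) k 0 := by
      simp only [solution_alt, PySem.Dict.foldl_insert_getD_add_one_eq_counter]
    rw [hstep, ← hn, ← hvals, ← hbucketdef, pyRange_desc, outerLoop_eq_G, hL]
  -- the two frequency lists are equal: both permute vals, both sorted descending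
  have hperm1 : ((PySem.List.sorted (PySem.Dict.counter t).items (fun x => -x.2)).map (·.2)).Perm vals := by
    rw [hvals]
    exact List.Perm.map (·.2) (PySem.List.sorted_perm (PySem.Dict.counter t).items (fun x => -x.2) false)
  have hpw1 : ((PySem.List.sorted (PySem.Dict.counter t).items (fun x => -x.2)).map (·.2)).Pairwise
      (fun a b : Int => b ≤ a) := by
    apply List.Pairwise.map (R := fun a b : Int × Int => -a.2 ≤ -b.2)
    · intro a b h
      omega
    · exact PySem.List.sorted_pairwise (PySem.Dict.counter t).items (fun x => -x.2)
  have heq : ((PySem.List.sorted (PySem.Dict.counter t).items (fun x => -x.2)).map (·.2))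
      = descRep vals n := by
    apply List.Perm.eq_of_pairwise (le := fun a b : Int => b ≤ a)
      (fun a b _ _ h1 h2 => le_antisymm h2 h1) hpw1 (descRep_pairwise vals n)
    exact hperm1.trans (descRep_perm vals n hbound).symm
  rw [hA, heq, hB]
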